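-- pv_equiv track=rewrite | github.com/TaherPatan/Pepcoding-Level-1-in-Python | 4 Basic Data Structures/1 Stacks and Queues/08 Infix Conversions.py | prefix
-- ===== SOURCE A (Python) =====
-- def solve(operators, variables_prefix, variables_postfix):
--     op_2_prefix, op_1_prefix = variables_prefix.pop(), variables_prefix.pop()
--     op_2_postfix, op_1_postfix = variables_postfix.pop(), variables_postfix.pop()
--     op = operators.pop()
--     variables_prefix.append(f'{op}{op_1_prefix}{op_2_prefix}')
--     variables_postfix.append(f'{op_1_postfix}{op_2_postfix}{op}')
--
-- def precedence(optr):
--     if optr in '+-':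
--         return 1
--     elif optr in '*/':
--         return 2
--     else:
--         return 0
--
-- def prefix(exp):
--     operators_stack, variables_prefix_stack, variables_postfix_stack = [], [], []
--     for ch in exp:
--         if 'a' <= ch <= 'z':
--             variables_prefix_stack.append(ch)
--             variables_postfix_stack.append(ch)
--         elif ch == '(':
--             operators_stack.append(ch)
--         elif ch in '+-*/':
--             while operators_stack and precedence(ch) <= precedence(operators_stack[-1]):
--                 solve(operators_stack, variables_prefix_stack, variables_postfix_stack)
--             operators_stack.append(ch)
--         elif ch == ')':
--             while operators_stack[-1] != '(':
--                 solve(operators_stack, variables_prefix_stack, variables_postfix_stack)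
--             operators_stack.pop()
--     while operators_stack:
--         solve(operators_stack, variables_prefix_stack, variables_postfix_stack)
--     return variables_prefix_stack.pop(), variables_postfix_stack.pop()
-- ===== SOURCE B (Python) =====
-- def prefix(exp):
--     # Online operator-precedence parser: one stack of paren frames, each frame
--     # holds (expr-so-far pair, pending +/- op, current term pair, pending */ op),
--     # reducing eagerly instead of deferring to operator stacks.
--     def combine(op, l, r):
--         return (op + l[0] + r[0], l[1] + r[1] + op)
--
--     def operand(frame, v):
--         e, a, t, m = frame
--         if m is not None:
--             return (e, a, combine(m, t, v), None)
--         return (e, a, v, None)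
--
--     def close(frame):
--         e, a, t, m = frame
--         return combine(a, e, t) if a is not None else t
--
--     stack = []
--     cur = (None, None, None, None)
--     for ch in exp:
--         if 'a' <= ch <= 'z':
--             cur = operand(cur, (ch, ch))
--         elif ch == '(':
--             stack.append(cur)
--             cur = (None, None, None, None)
--         elif ch in '+-':
--             cur = (close(cur), ch, None, None)
--         elif ch in '*/':
--             cur = (cur[0], cur[1], cur[2], ch)
--         elif ch == ')':
--             v = close(cur)
--             cur = operand(stack.pop(), v)
--     return close(cur)
-- ===== Notes on version B (the rewrite author's own statement) =====
-- stated objective: alternative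
-- what changed: Replaces A's shunting-yard scan over three parallel stacks (operator stack with lazy precedence-triggered reductions) by an online operator-precedence parser keeping one stack of per-parenthesis frames (expression-so-far pair, pending +/- operator, current term pair, pending */ operator) that reduces eagerly as each operand completes.
-- outside the precondition, e.g. on prefix('ab+cd'): A returns ('+cd', 'cd+'), B returns ('+bd', 'bd+'); on prefix('c ( c'): A returns ('(cc', 'cc('), B returns ('c', 'c'); on prefix('('): A raises IndexError, B returns None
import Mathlib
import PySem

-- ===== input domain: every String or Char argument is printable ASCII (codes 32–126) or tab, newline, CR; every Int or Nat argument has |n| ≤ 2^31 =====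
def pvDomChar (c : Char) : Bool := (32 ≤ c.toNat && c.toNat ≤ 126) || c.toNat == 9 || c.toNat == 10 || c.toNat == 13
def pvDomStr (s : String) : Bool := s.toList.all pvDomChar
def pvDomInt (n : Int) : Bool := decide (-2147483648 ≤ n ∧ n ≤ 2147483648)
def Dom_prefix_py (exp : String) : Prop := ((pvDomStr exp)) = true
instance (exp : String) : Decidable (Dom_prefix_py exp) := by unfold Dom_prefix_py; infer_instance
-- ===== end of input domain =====

-- B replaces A's shunting-yard loop over three parallel stacks by an online
-- operator-precedence parser (one stack of per-parenthesis frames, eager reduction);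
-- objective: alternative decomposition, same linear cost.

-- ===== PORT A =====
-- Stacks are Lean lists with the TOP at the head (Python appends/pops at the end).
def precA (c : Char) : Int :=
  if c = '+' ∨ c = '-' then 1 else if c = '*' ∨ c = '/' then 2 else 0

-- the body of Python's `solve` (pop two operands and one operator, push the combined
-- strings) is inlined into each of A's three while-loops so that each loop is a
-- structural recursion on the operator stack; the computation is step-for-step the same.
-- `while operators_stack and precedence(ch) <= precedence(operators_stack[-1]): solve(...)`
def whileLeA (c : Char) : List Char → List String → List String → List Char × List String × List String
  | [], vp, vq => ([], vp, vq)
  | o :: ops, vp, vq =>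
    if precA c ≤ precA o then
      match vp, vq with
      | p2 :: p1 :: vp', q2 :: q1 :: vq' =>
          whileLeA c ops ((String.singleton o ++ p1 ++ p2) :: vp')
            ((q1 ++ q2 ++ String.singleton o) :: vq')
      | _, _ => (o :: ops, vp, vq)   -- Python raises IndexError here (outside Pre_)
    else (o :: ops, vp, vq)

-- `while operators_stack[-1] != '(': solve(...)` then pop the '('
def whileParenA : List Char → List String → List String → List Char × List String × List String
  | [], vp, vq => ([], vp, vq)       -- Python raises IndexError here (outside Pre_)
  | o :: ops, vp, vq =>
    if o = '(' then (ops, vp, vq)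
    else
      match vp, vq with
      | p2 :: p1 :: vp', q2 :: q1 :: vq' =>
          whileParenA ops ((String.singleton o ++ p1 ++ p2) :: vp')
            ((q1 ++ q2 ++ String.singleton o) :: vq')
      | _, _ => (o :: ops, vp, vq)   -- Python raises IndexError here (outside Pre_)

-- trailing `while operators_stack: solve(...)`
def whileEndA : List Char → List String → List String → List String × List String
  | [], vp, vq => (vp, vq)
  | o :: ops, vp, vq =>
    match vp, vq with
    | p2 :: p1 :: vp', q2 :: q1 :: vq' =>
        whileEndA ops ((String.singleton o ++ p1 ++ p2) :: vp')
          ((q1 ++ q2 ++ String.singleton o) :: vq')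
    | _, _ => (vp, vq)               -- Python raises IndexError here (outside Pre_)

-- one iteration of A's `for ch in exp`
def stepA (st : List Char × List String × List String) (c : Char) :
    List Char × List String × List String :=
  let ops := st.1; let vp := st.2.1; let vq := st.2.2
  if 'a' ≤ c ∧ c ≤ 'z' then (ops, String.singleton c :: vp, String.singleton c :: vq)
  else if c = '(' then (c :: ops, vp, vq)
  else if c = '+' ∨ c = '-' ∨ c = '*' ∨ c = '/' then
    let r := whileLeA c ops vp vq
    (c :: r.1, r.2.1, r.2.2)
  else if c = ')' then whileParenA ops vp vq
  else st

-- trailing while + the two final `.pop()`s (empty pop = IndexError, outside Pre_)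
def finishA (st : List Char × List String × List String) : String × String :=
  let r := whileEndA st.1 st.2.1 st.2.2
  (r.1.headD "", r.2.headD "")

def prefix_py (exp : String) : String × String :=
  finishA (exp.toList.foldl stepA ([], [], []))

-- ===== PORT B =====
-- frame: expression-so-far pair, pending +/- operator, current term pair, pending */ operator
structure FrameB where
  e : Option (String × String)
  a : Option Char
  t : Option (String × String)
  m : Option Char
deriving Repr, DecidableEq

def combineB (op : Char) (l r : String × String) : String × String :=
  (String.singleton op ++ l.1 ++ r.1, l.2 ++ r.2 ++ String.singleton op)

def operandB (f : FrameB) (v : String × String) : FrameB :=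
  match f.m with
  | some m => ⟨f.e, f.a, some (combineB m (f.t.getD ("", "")) v), none⟩
  | none => ⟨f.e, f.a, some v, none⟩

def closeB (f : FrameB) : String × String :=
  match f.a with
  | some a => combineB a (f.e.getD ("", "")) (f.t.getD ("", ""))
  | none => f.t.getD ("", "")

def stepB (st : List FrameB × FrameB) (c : Char) : List FrameB × FrameB :=
  let stk := st.1; let f := st.2
  if 'a' ≤ c ∧ c ≤ 'z' then (stk, operandB f (String.singleton c, String.singleton c))
  else if c = '(' then (f :: stk, ⟨none, none, none, none⟩)
  else if c = '+' ∨ c = '-' then (stk, ⟨some (closeB f), some c, none, none⟩)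
  else if c = '*' ∨ c = '/' then (stk, ⟨f.e, f.a, f.t, some c⟩)
  else if c = ')' then
    match stk with
    | g :: stk' => (stk', operandB g (closeB f))
    | [] => (stk, f)                 -- Python raises IndexError here (outside Pre_)
  else st

def prefix_py_alt (exp : String) : String × String :=
  closeB (exp.toList.foldl stepB ([], ⟨none, none, none, none⟩)).2

-- ===== PRECONDITION & SPEC =====
-- syntactic well-formedness of the (recognized characters of the) expression:
-- variables/'(' only where an operand may start, operators/')' only after a complete
-- operand, balanced parentheses; unrecognized characters are ignored (as both programs do)
def checkWF : Bool → Bool → Nat → List Char → Bool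
  | expect, _, depth, [] => expect && depth == 0
  | expect, loose, depth, c :: cs =>
    if 'a' ≤ c ∧ c ≤ 'z' then (!expect || (loose && depth == 0)) && checkWF true loose depth cs
    else if c = '(' then !expect && checkWF false loose (depth + 1) cs
    else if c = '+' ∨ c = '-' ∨ c = '*' ∨ c = '/' then
      expect && checkWF false (if depth == 0 then false else loose) depth cs
    else if c = ')' then expect && decide (0 < depth) && checkWF true loose (depth - 1) cs
    else checkWF expect loose depth cs

-- Pre_ excludes malformed expressions (operators or parentheses out of place, unbalanced
-- parentheses, extra operands after an operator has occurred), on which A either raises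
-- IndexError or returns an accidental value assembled from whatever is left on its stacks
-- (sometimes containing '('); stray extra leading operands at the top level are admitted
-- (both programs keep only the last).
def Pre_prefix_py (exp : String) : Prop := checkWF false true 0 exp.toList = true
instance (exp : String) : Decidable (Pre_prefix_py exp) := by unfold Pre_prefix_py; infer_instance

def pvWitness_prefix_py : String := "a+b*(c-d)/e"

def Spec_prefix_py (exp : String) (out : String × String) : Prop := out = prefix_py_alt exp
instance (exp : String) (out : String × String) : Decidable (Spec_prefix_py exp out) := by unfold Spec_prefix_py; infer_instance

-- ===== CLAIM (what is proved, stated in full; the proofs are below) =====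
def Claim_equal_prefix_py : Prop := ∀ (exp : String), Dom_prefix_py exp → Pre_prefix_py exp → Spec_prefix_py exp (prefix_py exp)

-- ===== LEMMAS AND PROOFS =====

-- field-presence discipline of a frame at an operand-expected position
def aeOK : Option Char → Option (String × String) → Prop
  | some a, some _ => a = '+' ∨ a = '-'
  | none, none => True
  | _, _ => False

def tmOK : Option (String × String) → Option Char → Prop
  | some _, some m => m = '*' ∨ m = '/'
  | none, none => True
  | _, _ => False

def shapeWF (f : FrameB) : Prop := aeOK f.a f.e ∧ tmOK f.t f.m

-- A's stack segment encoded by a frozen (operand-expected) frame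
def frOps (f : FrameB) : List Char := f.m.toList ++ f.a.toList
def frVp (f : FrameB) : List String := (f.t.map Prod.fst).toList ++ (f.e.map Prod.fst).toList
def frVq (f : FrameB) : List String := (f.t.map Prod.snd).toList ++ (f.e.map Prod.snd).toList
def encOps (stk : List FrameB) : List Char := stk.flatMap (fun g => '(' :: frOps g)
def encVp (stk : List FrameB) : List String := stk.flatMap frVp
def encVq (stk : List FrameB) : List String := stk.flatMap frVq

-- relation between B's current frame and A's top stack segment, after a complete operand
def relT (f : FrameB) (ops : List Char) (vp vq : List String) : Prop :=
  f.m = none ∧ aeOK f.a f.e ∧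
  ((∃ w, f.t = some w ∧ ops = f.a.toList ∧
      vp = w.1 :: (f.e.map Prod.fst).toList ∧ vq = w.2 :: (f.e.map Prod.snd).toList)
   ∨ (∃ m t v, (m = '*' ∨ m = '/') ∧ f.t = some (combineB m t v) ∧ ops = m :: f.a.toList ∧
      vp = v.1 :: t.1 :: (f.e.map Prod.fst).toList ∧
      vq = v.2 :: t.2 :: (f.e.map Prod.snd).toList))

-- the same relation at an operand-expected position
def relS (f : FrameB) (ops : List Char) (vp vq : List String) : Prop :=
  shapeWF f ∧ ops = frOps f ∧ vp = frVp f ∧ vq = frVq f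

def relCur : Bool → FrameB → List Char → List String → List String → Prop
  | false, f, ops, vp, vq => relS f ops vp vq
  | true, f, ops, vp, vq => relT f ops vp vq

lemma whileLe_encOps (c : Char) (hc : c = '+' ∨ c = '-' ∨ c = '*' ∨ c = '/')
    (stk : List FrameB) (vp vq : List String) :
    whileLeA c (encOps stk) vp vq = (encOps stk, vp, vq) := by
  cases stk with
  | nil => simp [encOps, whileLeA]
  | cons g stk' =>
      have h : ¬ precA c ≤ precA '(' := by
        rcases hc with h | h | h | h <;> subst h <;> decide
      simp [encOps, whileLeA, h]

lemma relT_operand (f : FrameB) (v : String × String) (tops : List Char) (tvp tvq : List String)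
    (hrel : relS f tops tvp tvq) :
    relT (operandB f v) tops (v.1 :: tvp) (v.2 :: tvq) := by
  obtain ⟨⟨hae, htm⟩, hops, hvp, hvq⟩ := hrel
  subst hops hvp hvq
  cases hft : f.t <;> cases hfm : f.m <;> rw [hft, hfm] at htm <;> simp only [tmOK] at htm
  · have hop : operandB f v = ⟨f.e, f.a, some v, none⟩ := by simp [operandB, hfm]
    rw [hop]
    exact ⟨rfl, hae, Or.inl ⟨v, rfl, by simp [frOps, hfm],
      by simp [frVp, hft], by simp [frVq, hft]⟩⟩
  · next w m =>
    have hop : operandB f v = ⟨f.e, f.a, some (combineB m w v), none⟩ := by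
      simp [operandB, hfm, hft]
    rw [hop]
    exact ⟨rfl, hae, Or.inr ⟨m, w, v, htm, rfl, by simp [frOps, hfm],
      by simp [frVp, hft], by simp [frVq, hft]⟩⟩

lemma seg_close_le (c : Char) (hc : c = '+' ∨ c = '-') (f : FrameB)
    (tops : List Char) (tvp tvq : List String) (hrel : relT f tops tvp tvq)
    (O : List Char) (P Q : List String)
    (hO : ∀ vp vq, whileLeA c O vp vq = (O, vp, vq)) :
    whileLeA c (tops ++ O) (tvp ++ P) (tvq ++ Q) = (O, (closeB f).1 :: P, (closeB f).2 :: Q) := by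
  obtain ⟨hm, hae, hcase⟩ := hrel
  cases hfa : f.a <;> cases hfe : f.e <;> rw [hfa, hfe] at hae <;> simp only [aeOK] at hae <;>
    rcases hcase with ⟨w, ht, hops, hvp, hvq⟩ | ⟨m, t, v, hmv, ht, hops, hvp, hvq⟩ <;>
    subst hops hvp hvq <;>
    rcases hc with hc | hc <;> subst hc <;>
    first
    | (rcases hae with hae | hae <;> rcases hmv with hmv | hmv <;> subst hae hmv <;>
        simp [whileLeA, precA, closeB, combineB, hfa, hfe, ht, hO])
    | (rcases hae with hae | hae <;> subst hae <;>
        simp [whileLeA, precA, closeB, combineB, hfa, hfe, ht, hO])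
    | (rcases hmv with hmv | hmv <;> subst hmv <;>
        simp [whileLeA, precA, closeB, combineB, hfa, hfe, ht, hO])
    | simp [whileLeA, precA, closeB, combineB, hfa, hfe, ht, hO]

lemma seg_close_paren (f : FrameB)
    (tops : List Char) (tvp tvq : List String) (hrel : relT f tops tvp tvq)
    (R : List Char) (P Q : List String) :
    whileParenA (tops ++ '(' :: R) (tvp ++ P) (tvq ++ Q)
      = (R, (closeB f).1 :: P, (closeB f).2 :: Q) := by
  obtain ⟨hm, hae, hcase⟩ := hrel
  cases hfa : f.a <;> cases hfe : f.e <;> rw [hfa, hfe] at hae <;> simp only [aeOK] at hae <;>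
    rcases hcase with ⟨w, ht, hops, hvp, hvq⟩ | ⟨m, t, v, hmv, ht, hops, hvp, hvq⟩ <;>
    subst hops hvp hvq <;>
    first
    | (rcases hae with hae | hae <;> rcases hmv with hmv | hmv <;> subst hae hmv <;>
        simp [whileParenA, closeB, combineB, hfa, hfe, ht])
    | (rcases hae with hae | hae <;> subst hae <;>
        simp [whileParenA, closeB, combineB, hfa, hfe, ht])
    | (rcases hmv with hmv | hmv <;> subst hmv <;>
        simp [whileParenA, closeB, combineB, hfa, hfe, ht])
    | simp [whileParenA, closeB, combineB, hfa, hfe, ht]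

lemma seg_close_end (f : FrameB)
    (tops : List Char) (tvp tvq : List String) (hrel : relT f tops tvp tvq)
    (P Q : List String) :
    whileEndA tops (tvp ++ P) (tvq ++ Q) = ((closeB f).1 :: P, (closeB f).2 :: Q) := by
  obtain ⟨hm, hae, hcase⟩ := hrel
  cases hfa : f.a <;> cases hfe : f.e <;> rw [hfa, hfe] at hae <;> simp only [aeOK] at hae <;>
    rcases hcase with ⟨w, ht, hops, hvp, hvq⟩ | ⟨m, t, v, hmv, ht, hops, hvp, hvq⟩ <;>
    subst hops hvp hvq <;>
    simp [whileEndA, closeB, combineB, hfa, hfe, ht]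

lemma seg_mul (c : Char) (hc : c = '*' ∨ c = '/') (f : FrameB)
    (tops : List Char) (tvp tvq : List String) (hrel : relT f tops tvp tvq)
    (O : List Char) (P Q : List String)
    (hO : ∀ vp vq, whileLeA c O vp vq = (O, vp, vq)) :
    ∃ w, f.t = some w ∧
      whileLeA c (tops ++ O) (tvp ++ P) (tvq ++ Q)
        = (f.a.toList ++ O, (w.1 :: (f.e.map Prod.fst).toList) ++ P,
           (w.2 :: (f.e.map Prod.snd).toList) ++ Q) := by
  obtain ⟨hm, hae, hcase⟩ := hrel
  cases hfa : f.a <;> cases hfe : f.e <;> rw [hfa, hfe] at hae <;> simp only [aeOK] at hae <;>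
    rcases hcase with ⟨w, ht, hops, hvp, hvq⟩ | ⟨m, t, v, hmv, ht, hops, hvp, hvq⟩ <;>
    subst hops hvp hvq <;>
    [skip; skip; skip; skip] <;>
    first
    | (refine ⟨w, ht, ?_⟩ ;
        (rcases hc with hc | hc <;> subst hc <;>
          first
          | (rcases hae with hae | hae <;> subst hae <;> simp [whileLeA, precA, hfa, hfe, hO])
          | simp [whileLeA, precA, hfa, hfe, hO]))
    | (refine ⟨_, ht, ?_⟩ ;
        (rcases hc with hc | hc <;> subst hc <;> rcases hmv with hmv | hmv <;> subst hmv <;>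
          first
          | (rcases hae with hae | hae <;> subst hae <;>
              simp [whileLeA, precA, combineB, hfa, hfe, hO])
          | simp [whileLeA, precA, combineB, hfa, hfe, hO]))

lemma relS_of_shape (g : FrameB) (h : shapeWF g) : relS g (frOps g) (frVp g) (frVq g) :=
  ⟨h, rfl, rfl, rfl⟩

def looseInv (f : FrameB) (stk : List FrameB) : Prop :=
  (stk = [] → f.a = none ∧ f.e = none ∧ f.m = none) ∧
  ∀ h : stk ≠ [], stk.getLast h = ⟨none, none, none, none⟩

lemma looseInv_operand (f : FrameB) (v : String × String) (stk : List FrameB)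
    (h : looseInv f stk) : looseInv (operandB f v) stk := by
  refine ⟨fun hs => ?_, h.2⟩
  obtain ⟨ha, he, hm⟩ := h.1 hs
  simp [operandB, hm, ha, he]

lemma main_inv : ∀ (cs : List Char) (stk : List FrameB) (f : FrameB) (expect loose : Bool)
    (tops : List Char) (tvp tvq jp jq : List String),
    checkWF expect loose stk.length cs = true →
    relCur expect f tops tvp tvq →
    (∀ g ∈ stk, shapeWF g) →
    (loose = true → looseInv f stk) →
    (loose = true → stk = [] → tops = []) →
    finishA (cs.foldl stepA (tops ++ encOps stk, tvp ++ (encVp stk ++ jp), tvq ++ (encVq stk ++ jq)))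
      = closeB (cs.foldl stepB (stk, f)).2 := by
  intro cs
  induction cs with
  | nil =>
    intro stk f expect loose tops tvp tvq jp jq hchk hrel hstk hl htops
    simp [checkWF] at hchk
    obtain ⟨hexp, hlen⟩ := hchk
    subst hexp; subst hlen
    simp only [List.foldl_nil, encOps, encVp, encVq, List.flatMap_nil, List.nil_append]
    simp [finishA, seg_close_end f tops tvp tvq hrel jp jq]
  | cons c cs ih =>
    intro stk f expect loose tops tvp tvq jp jq hchk hrel hstk hl htops
    rw [List.foldl_cons, List.foldl_cons]
    by_cases h1 : 'a' ≤ c ∧ c ≤ 'z'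
    · rw [checkWF, if_pos h1] at hchk
      simp only [Bool.and_eq_true, Bool.or_eq_true, Bool.not_eq_true', beq_iff_eq] at hchk
      obtain ⟨hcond, hchk⟩ := hchk
      cases hexpect : expect with
      | false =>
        subst hexpect
        have hstep : stepA (tops ++ encOps stk, tvp ++ (encVp stk ++ jp), tvq ++ (encVq stk ++ jq)) c
            = (tops ++ encOps stk, (String.singleton c :: tvp) ++ (encVp stk ++ jp),
               (String.singleton c :: tvq) ++ (encVq stk ++ jq)) := by
          simp [stepA, h1]
        rw [hstep]
        have hstepB : stepB (stk, f) c
            = (stk, operandB f (String.singleton c, String.singleton c)) := by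
          simp [stepB, h1]
        rw [hstepB]
        exact ih stk _ true loose tops _ _ jp jq hchk
          (relT_operand f (String.singleton c, String.singleton c) tops tvp tvq hrel) hstk
          (fun h => looseInv_operand f _ stk (hl h)) htops
      | true =>
        subst hexpect
        rcases hcond with hcond | ⟨hloose, hlen⟩
        · exact absurd hcond (by simp)
        · subst hloose
          have hstknil : stk = [] := List.length_eq_zero_iff.mp hlen
          subst hstknil
          obtain ⟨hfa, hfe, hfm⟩ := (hl rfl).1 rfl
          have htops0 : tops = [] := htops rfl rfl
          obtain ⟨hm, hae, hcase⟩ := hrel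
          have hopB : stepB (([] : List FrameB), f) c
              = ([], (⟨none, none, some (String.singleton c, String.singleton c), none⟩ : FrameB)) := by
            simp [stepB, h1, operandB, hm, hfa, hfe]
          rcases hcase with ⟨w, ht, hops, hvp, hvq⟩ | ⟨m0, t0, v0, hmv, ht, hops, hvp, hvq⟩
          case _ =>
            subst hops hvp hvq
            rw [hfa] at *; rw [hfe] at *
            have hstep : stepA ((Option.toList none : List Char) ++ encOps [],
                (w.1 :: (Option.map Prod.fst (none (α := String × String))).toList) ++ (encVp [] ++ jp),
                (w.2 :: (Option.map Prod.snd (none (α := String × String))).toList) ++ (encVq [] ++ jq)) c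
                = (([] : List Char) ++ encOps [],
                   [String.singleton c] ++ (encVp [] ++ (w.1 :: jp)),
                   [String.singleton c] ++ (encVq [] ++ (w.2 :: jq))) := by
              simp [stepA, h1, encOps, encVp, encVq]
            rw [hstep, hopB]
            exact ih [] _ true true [] _ _ _ _ hchk
              ⟨rfl, trivial, Or.inl ⟨_, rfl, by simp, by simp, by simp⟩⟩
              (by simp) (fun _ => ⟨fun _ => ⟨rfl, rfl, rfl⟩, fun h => absurd rfl h⟩)
              (fun _ _ => rfl)
          case _ =>
            rw [htops0] at hops
            simp at hops
    · by_cases h2 : c = '('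
      · rw [checkWF, if_neg h1, if_pos h2] at hchk
        simp only [Bool.and_eq_true, Bool.not_eq_true'] at hchk
        obtain ⟨hexp, hchk⟩ := hchk
        subst hexp
        obtain ⟨hsh, hops, hvp, hvq⟩ := hrel
        subst hops hvp hvq
        have hstep : stepA (frOps f ++ encOps stk, frVp f ++ (encVp stk ++ jp), frVq f ++ (encVq stk ++ jq)) c
            = (([] : List Char) ++ encOps (f :: stk), ([] : List String) ++ (encVp (f :: stk) ++ jp),
               ([] : List String) ++ (encVq (f :: stk) ++ jq)) := by
          simp [stepA, h1, h2, encOps, encVp, encVq]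
        rw [hstep]
        have hstepB : stepB (stk, f) c = (f :: stk, ⟨none, none, none, none⟩) := by
          simp [stepB, h1, h2]
        rw [hstepB]
        refine ih (f :: stk) _ false loose [] [] [] jp jq (by simpa using hchk)
          ⟨by constructor <;> simp [aeOK, tmOK], rfl, rfl, rfl⟩ ?_ ?_ (fun _ _ => rfl)
        · intro g hg
          rcases List.mem_cons.mp hg with hg | hg
          · subst hg; exact hsh
          · exact hstk g hg
        · intro hlt
          refine ⟨fun hcontra => by simp at hcontra, fun h => ?_⟩
          obtain ⟨hli1, hli2⟩ := hl hlt
          revert h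
          cases stk with
          | nil =>
            intro h
            obtain ⟨hfa, hfe, hfm⟩ := hli1 rfl
            have hft : f.t = none := by
              cases hfttest : f.t with
              | none => rfl
              | some w =>
                have h2' := hsh.2
                rw [hfttest, hfm] at h2'
                simp [tmOK] at h2'
            simp only [List.getLast_singleton]
            cases f
            simp_all
          | cons g stk' =>
            intro h
            rw [List.getLast_cons (by simp)]
            exact hli2 (by simp)
      · by_cases h3 : c = '+' ∨ c = '-' ∨ c = '*' ∨ c = '/'
        · rw [checkWF, if_neg h1, if_neg h2, if_pos h3] at hchk
          simp only [Bool.and_eq_true] at hchk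
          obtain ⟨hexp, hchk⟩ := hchk
          subst hexp
          have hO := whileLe_encOps c h3 stk
          have hlstep : ∀ (f' : FrameB), (∀ hlt : (if (stk.length == 0 : Bool) then false else loose) = true,
              looseInv f' stk) := by
            intro f' hlt
            cases hstkc : stk with
            | nil => rw [hstkc] at hlt; simp at hlt
            | cons g stk' =>
              subst hstkc
              have hlo : loose = true := by simpa using hlt
              exact ⟨fun hcontra => by simp at hcontra,
                fun h => (hl hlo).2 (by simp)⟩
          by_cases h34 : c = '+' ∨ c = '-'
          · have hred := seg_close_le c h34 f tops tvp tvq hrel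
              (encOps stk) (encVp stk ++ jp) (encVq stk ++ jq) hO
            have hstep : stepA (tops ++ encOps stk, tvp ++ (encVp stk ++ jp), tvq ++ (encVq stk ++ jq)) c
                = ([c] ++ encOps stk, [(closeB f).1] ++ (encVp stk ++ jp), [(closeB f).2] ++ (encVq stk ++ jq)) := by
              simp [stepA, h1, h2, h3, hred]
            rw [hstep]
            have hstepB : stepB (stk, f) c = (stk, ⟨some (closeB f), some c, none, none⟩) := by
              simp [stepB, h1, h2, h34]
            rw [hstepB]
            refine ih stk _ false _ [c] _ _ jp jq hchk ?_ hstk (hlstep _)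
              (fun hlo hs => by rw [hs] at hlo; simp at hlo)
            exact ⟨⟨by simpa [aeOK] using h34, by simp [tmOK]⟩,
              by simp [frOps], by simp [frVp], by simp [frVq]⟩
          · have h56 : c = '*' ∨ c = '/' := by
              rcases h3 with h | h | h | h
              · exact absurd (Or.inl h) h34
              · exact absurd (Or.inr h) h34
              · exact Or.inl h
              · exact Or.inr h
            obtain ⟨w, htw, hred⟩ := seg_mul c h56 f tops tvp tvq hrel
              (encOps stk) (encVp stk ++ jp) (encVq stk ++ jq) hO
            have hstep : stepA (tops ++ encOps stk, tvp ++ (encVp stk ++ jp), tvq ++ (encVq stk ++ jq)) c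
                = ((c :: f.a.toList) ++ encOps stk,
                   (w.1 :: (f.e.map Prod.fst).toList) ++ (encVp stk ++ jp),
                   (w.2 :: (f.e.map Prod.snd).toList) ++ (encVq stk ++ jq)) := by
              simp [stepA, h1, h2, h3, hred]
            rw [hstep]
            have hstepB : stepB (stk, f) c = (stk, ⟨f.e, f.a, f.t, some c⟩) := by
              simp [stepB, h1, h2, h34, h56]
            rw [hstepB]
            refine ih stk _ false _ (c :: f.a.toList) _ _ jp jq hchk ?_ hstk (hlstep _)
              (fun hlo hs => by rw [hs] at hlo; simp at hlo)
            exact ⟨⟨hrel.2.1, by simp [tmOK, htw, h56]⟩,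
              by simp [frOps], by simp [frVp, htw], by simp [frVq, htw]⟩
        · by_cases h4 : c = ')'
          · rw [checkWF, if_neg h1, if_neg h2, if_neg h3, if_pos h4] at hchk
            simp only [Bool.and_eq_true, decide_eq_true_eq] at hchk
            obtain ⟨⟨hexp, hd⟩, hchk⟩ := hchk
            subst hexp
            cases stk with
            | nil => simp at hd
            | cons g stk' =>
              have hstep : stepA (tops ++ encOps (g :: stk'), tvp ++ (encVp (g :: stk') ++ jp), tvq ++ (encVq (g :: stk') ++ jq)) c
                  = (frOps g ++ encOps stk',
                     ((closeB f).1 :: frVp g) ++ (encVp stk' ++ jp),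
                     ((closeB f).2 :: frVq g) ++ (encVq stk' ++ jq)) := by
                have h5 : ¬ ('a' ≤ c ∧ c ≤ 'z') := h1
                have henc : tops ++ encOps (g :: stk') = tops ++ '(' :: (frOps g ++ encOps stk') := by
                  simp [encOps]
                simp only [stepA, h5, h2, h3, h4, if_neg, if_pos, if_false, if_true, henc,
                  encVp, encVq, List.flatMap_cons]
                rw [show tvp ++ (frVp g ++ List.flatMap frVp stk' ++ jp) = tvp ++ (frVp g ++ (encVp stk' ++ jp)) by simp [encVp],
                  show tvq ++ (frVq g ++ List.flatMap frVq stk' ++ jq) = tvq ++ (frVq g ++ (encVq stk' ++ jq)) by simp [encVq]]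
                rw [seg_close_paren f tops tvp tvq hrel (frOps g ++ encOps stk')
                  (frVp g ++ (encVp stk' ++ jp)) (frVq g ++ (encVq stk' ++ jq))]
                simp [encVp, encVq]
              rw [hstep]
              have hstepB : stepB (g :: stk', f) c = (stk', operandB g (closeB f)) := by
                have hp : ¬ (c = '+' ∨ c = '-') := fun h => h3 (h.imp id Or.inl)
                have hm : ¬ (c = '*' ∨ c = '/') := fun h => h3 (Or.inr (Or.inr h))
                simp [stepB, h1, h2, hp, hm, h4]
              rw [hstepB]
              refine ih stk' _ true loose (frOps g) _ _ jp jq (by simpa using hchk) ?_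
                (fun g' hg' => hstk g' (by simp [hg'])) ?_ ?_
              · exact relT_operand g (closeB f) _ _ _
                  (relS_of_shape g (hstk g (by simp)))
              · intro hlt
                obtain ⟨hli1, hli2⟩ := hl hlt
                refine ⟨fun hs => ?_, fun h => ?_⟩
                · subst hs
                  have hg : g = ⟨none, none, none, none⟩ := by
                    have := hli2 (by simp)
                    simpa [List.getLast_singleton] using this
                  subst hg
                  simp [operandB]
                · have hx := hli2 (by simp)
                  rw [List.getLast_cons h] at hx
                  exact hx
              · intro hlt hs
                subst hs
                have hg : g = ⟨none, none, none, none⟩ := by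
                  have := (hl hlt).2 (by simp)
                  simpa [List.getLast_singleton] using this
                subst hg
                simp [frOps]
          · rw [checkWF, if_neg h1, if_neg h2, if_neg h3, if_neg h4] at hchk
            have hstep : stepA (tops ++ encOps stk, tvp ++ (encVp stk ++ jp), tvq ++ (encVq stk ++ jq)) c
                = (tops ++ encOps stk, tvp ++ (encVp stk ++ jp), tvq ++ (encVq stk ++ jq)) := by
              simp [stepA, h1, h2, h3, h4]
            have hstepB : stepB (stk, f) c = (stk, f) := by
              have hp : ¬ (c = '+' ∨ c = '-') := fun h => h3 (h.imp id Or.inl)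
              have hm : ¬ (c = '*' ∨ c = '/') := fun h => h3 (Or.inr (Or.inr h))
              simp [stepB, h1, h2, hp, hm, h4]
            rw [hstep, hstepB]
            exact ih stk f expect loose tops tvp tvq jp jq hchk hrel hstk hl htops

-- ===== VERDICT (by name: the statement is the Claim_ definition above) =====
theorem prefix_py_spec : Claim_equal_prefix_py := by
  intro exp _ hpre
  unfold Spec_prefix_py prefix_py prefix_py_alt
  have h := main_inv exp.toList [] ⟨none, none, none, none⟩ false true [] [] [] [] [] hpre
    (by exact ⟨⟨trivial, trivial⟩, rfl, rfl, rfl⟩) (by simp)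
    (fun _ => ⟨fun _ => ⟨rfl, rfl, rfl⟩, fun h => absurd rfl h⟩) (fun _ _ => rfl)
  simpa [encOps, encVp, encVq] using h
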